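-- pv_equiv track=rewrite | github.com/ind1xa/opm | funkcije.py | dohvatiSljInjek
-- ===== SOURCE A (Python) =====
-- def dohvatiSljInjek(prethodna, n):
--     nova = prethodna.copy()
--     broj = 0
--     for x in range (0, len(prethodna)):
--         broj = moguPovecatNa(prethodna, len(prethodna)-1-x, n)
--         if (broj != -1):
--             nova[len(nova)-1-x] = broj
--             for y in range (len(prethodna)-x, len(prethodna)):
--                 povecanje = moguPovecatNa(nova, y, n, True)
--                 if (povecanje == -1): return []
--                 nova[y] = povecanje
--             return nova
--     return []
--
-- def moguPovecatNa(prethodnaFja, index, n, kreniOd0 = False):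
--     fjaZaBrojanje = []
--     prethodna = prethodnaFja.copy()
--     if (kreniOd0): prethodna[index] = 0;
--     for x in range (0, index):
--         fjaZaBrojanje.append(prethodna[x])
--     i = 1
--     while (prethodna[index] + i <= n):
--         if (fjaZaBrojanje.count(prethodna[index] + i) == 0):
--             return prethodna[index] + i
--         i = i +1
--     return -1
-- ===== SOURCE B (Python) =====
-- def dohvatiSljInjek(prethodna, n):
--     L = len(prethodna)
--     for pos in range(L - 1, -1, -1):
--         used = set(prethodna[:pos])
--         # smallest value > prethodna[pos] not used; it lies within a window of
--         # pos+1 candidates (used has at most pos elements), capped at n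
--         lo = prethodna[pos] + 1
--         hi = min(n, prethodna[pos] + pos + 1)
--         v = next((c for c in range(lo, hi + 1) if c not in used), -1)
--         if v == -1:
--             continue
--         need = L - 1 - pos
--         # the `need` smallest values in 1..n free of used+{v} all lie in 1..K
--         K = min(n, need + pos + 1)
--         avail = [c for c in range(1, K + 1) if c not in used and c != v]
--         if len(avail) < need:
--             return []
--         return prethodna[:pos] + [v] + avail[:need]
--     return []
-- ===== Notes on version B (the rewrite author's own statement) =====
-- stated objective: faster
-- what changed: Instead of A's per-candidate while-loop with a repeated list.count scan over a rebuilt prefix copy at every position, B builds a set of the prefix once per position, searches a pigeonhole-bounded candidate window with next(..., -1), and produces the whole tail in one filtered range slice instead of A's element-by-element refill loop.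
import Mathlib
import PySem

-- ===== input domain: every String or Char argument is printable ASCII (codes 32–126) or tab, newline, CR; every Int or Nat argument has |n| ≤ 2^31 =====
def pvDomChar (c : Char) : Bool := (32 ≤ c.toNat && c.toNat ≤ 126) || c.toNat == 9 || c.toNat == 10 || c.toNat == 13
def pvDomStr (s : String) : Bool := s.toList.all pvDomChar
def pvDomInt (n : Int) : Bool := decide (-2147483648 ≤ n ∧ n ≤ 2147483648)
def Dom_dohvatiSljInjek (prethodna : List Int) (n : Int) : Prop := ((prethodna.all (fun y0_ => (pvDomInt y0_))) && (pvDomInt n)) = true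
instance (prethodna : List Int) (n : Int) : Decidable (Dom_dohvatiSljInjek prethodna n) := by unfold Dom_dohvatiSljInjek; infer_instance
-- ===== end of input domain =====

-- B replaces A's repeated count-scan helper by a prefix set with a pigeonhole-bounded candidate
-- window and one filtered/sliced range instead of the element-by-element refill loop
-- (objective: alternative; same return value on every input).

-- ===== PORT A =====
-- the `while prethodna[index] + i <= n` loop of moguPovecatNa
def mpnLoop (fja : List Int) (base n i : Int) : Int :=
  if _h : base + i ≤ n then
    if fja.count (base + i) = 0 then base + i
    else mpnLoop fja base n (i + 1)
  else -1
termination_by (n + 1 - (base + i)).toNat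
decreasing_by omega

-- A copies the list, optionally zeroes position `index`, and its append loop builds
-- prethodna[:index]; every call site has 0 ≤ index < len(prethodnaFja), so take/getD are exact.
def moguPovecatNa (prethodnaFja : List Int) (index : Nat) (n : Int) (kreniOd0 : Bool) : Int :=
  let prethodna := if kreniOd0 then prethodnaFja.set index 0 else prethodnaFja
  let fja := prethodna.take index
  mpnLoop fja (prethodna.getD index 0) n 1

-- the inner `for y in range(len(prethodna)-x, len(prethodna))` loop (early return [] on -1)
def aFill (nova : List Int) (y L : Nat) (n : Int) : List Int :=
  if y < L then
    let povecanje := moguPovecatNa nova y n true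
    if povecanje = -1 then []
    else aFill (nova.set y povecanje) (y + 1) L n
  else nova
termination_by L - y

-- the outer `for x in range(0, len(prethodna))` loop; nova = prethodna until the success branch
def aLoop (prethodna nova : List Int) (n : Int) (x : Nat) : List Int :=
  if x < prethodna.length then
    if moguPovecatNa prethodna (prethodna.length - 1 - x) n false ≠ -1 then
      aFill (nova.set (nova.length - 1 - x) (moguPovecatNa prethodna (prethodna.length - 1 - x) n false))
        (prethodna.length - x) prethodna.length n
    else aLoop prethodna nova n (x + 1)
  else []
termination_by prethodna.length - x

def dohvatiSljInjek (prethodna : List Int) (n : Int) : List Int :=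
  aLoop prethodna prethodna n 0

-- ===== PORT B =====
-- `for pos in range(L-1, -1, -1)`: argument pos is the count of remaining positions (index pos-1);
-- `next(gen, -1)` is ported as `(….find? …).getD (-1)`
def bLoop (p : List Int) (n : Int) (pos : Nat) : List Int :=
  match pos with
  | 0 => []
  | pp + 1 =>
    let used : PySem.Set Int := PySem.Set.ofList (p.take pp)
    let lo := p.getD pp 0 + 1
    let hi := min n (p.getD pp 0 + (pp : Int) + 1)
    let v := ((PySem.List.pyRange lo (hi + 1)).find? (fun c => !(PySem.Set.contains used c))).getD (-1)
    if v == -1 then bLoop p n pp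
    else
      let need := p.length - 1 - pp
      let K := min n ((need : Int) + (pp : Int) + 1)
      let avail := (PySem.List.pyRange 1 (K + 1)).filter
        (fun c => !(PySem.Set.contains used c) && !(c == v))
      if avail.length < need then []
      else p.take pp ++ [v] ++ avail.take need

def dohvatiSljInjek_alt (prethodna : List Int) (n : Int) : List Int :=
  bLoop prethodna n prethodna.length

-- ===== PRECONDITION & SPEC =====
def Spec_dohvatiSljInjek (prethodna : List Int) (n : Int) (out : List Int) : Prop := out = dohvatiSljInjek_alt prethodna n
instance (prethodna : List Int) (n : Int) (out : List Int) : Decidable (Spec_dohvatiSljInjek prethodna n out) := by unfold Spec_dohvatiSljInjek; infer_instance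

-- ===== CLAIM (what is proved, stated in full; the proofs are below) =====
def Claim_equal_dohvatiSljInjek : Prop := ∀ (prethodna : List Int) (n : Int), Dom_dohvatiSljInjek prethodna n → Spec_dohvatiSljInjek prethodna n (dohvatiSljInjek prethodna n)

-- ===== LEMMAS AND PROOFS =====

-- A's first-free search over the untouched prefix, as an Option (none = A's while loop exhausts)
def ffA (p : List Int) (n : Int) (pos : Nat) : Option Int :=
  (PySem.List.pyRange (p.getD pos 0 + 1) (n + 1)).find? (fun c => !(p.take pos).contains c)

theorem mpnLoop_eq (fja : List Int) (base n : Int) : ∀ i,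
    mpnLoop fja base n i
      = ((PySem.List.pyRange (base + i) (n + 1)).find? (fun c => !fja.contains c)).getD (-1) := by
  intro i
  induction i using mpnLoop.induct (fja := fja) (base := base) (n := n) with
  | case1 i h hc =>
    rw [mpnLoop, dif_pos h, if_pos hc,
        PySem.List.pyRange_one_cons (by omega : base + i < n + 1), List.find?_cons]
    have hni : (!fja.contains (base + i)) = true := by
      rw [List.count_eq_zero] at hc; simpa using hc
    rw [hni]; rfl
  | case2 i h hc ih =>
    rw [mpnLoop, dif_pos h, if_neg hc,
        PySem.List.pyRange_one_cons (by omega : base + i < n + 1), List.find?_cons]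
    have hni : (!fja.contains (base + i)) = false := by
      simp only [Bool.not_eq_false', List.contains_eq_mem, decide_eq_true_eq]
      exact List.count_pos_iff.1 (Nat.pos_of_ne_zero hc)
    rw [hni]; rw [ih]; ring_nf
  | case3 i h =>
    rw [mpnLoop, dif_neg h, PySem.List.pyRange_one_eq_nil (by omega)]; rfl

theorem find?_eq_head?_filter {α : Type} (p : α → Bool) (l : List α) :
    l.find? p = (l.filter p).head? := by
  induction l with
  | nil => rfl
  | cons a t ih =>
    rw [List.find?_cons, List.filter_cons]
    by_cases h : p a
    · rw [h]; simp
    · simp only [Bool.not_eq_true] at h; rw [h]; simpa using ih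

theorem filter_drop_head {l : List Int} (hl : l.Nodup) {p : Int → Bool} {a : Int} {r : List Int}
    (h : l.filter p = a :: r) : l.filter (fun c => p c && !(c == a)) = r := by
  induction l with
  | nil => simp at h
  | cons b t ih =>
    rw [List.filter_cons] at h ⊢
    by_cases hb : p b
    · rw [if_pos hb] at h
      obtain ⟨rfl, rfl⟩ : b = a ∧ t.filter p = r := by simpa using h
      have hbt : b ∉ t := (List.nodup_cons.1 hl).1
      simp only [hb, beq_self_eq_true, Bool.not_true, Bool.and_false, Bool.false_eq_true,
        if_false]
      rw [List.filter_congr (fun c hc => ?_)]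
      have hcb : c ≠ b := fun hcb => hbt (hcb ▸ hc)
      simp [hcb]
    · rw [if_neg hb] at h
      simp only [hb, Bool.false_and, Bool.false_eq_true, if_false]
      exact ih (List.nodup_cons.1 hl).2 h

theorem filter_mem_length_le {l P : List Int} (hl : l.Nodup) :
    (l.filter (fun c => P.contains c)).length ≤ P.length := by
  have hnd : (l.filter (fun c => P.contains c)).Nodup := hl.filter _
  calc (l.filter (fun c => P.contains c)).length
      = (l.filter (fun c => P.contains c)).toFinset.card := (List.toFinset_card_of_nodup hnd).symm
    _ ≤ P.toFinset.card := by
        apply Finset.card_le_card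
        intro x hx
        rw [List.mem_toFinset] at hx ⊢
        have := List.of_mem_filter hx
        simpa using this
    _ ≤ P.length := List.toFinset_card_le P

theorem length_le_filter_add {l P : List Int} (hl : l.Nodup) :
    l.length ≤ (l.filter (fun c => !P.contains c)).length + P.length := by
  have h := List.length_eq_length_filter_add (l := l) (fun c => P.contains c)
  have h2 := filter_mem_length_le (P := P) hl
  omega

theorem pigeon_window (P : List Int) (lo : Int) (m : Nat) (hP : P.length ≤ m) :
    ∃ c ∈ PySem.List.pyRange lo (lo + m + 1), (!P.contains c) = true := by
  by_contra hcon
  push_neg at hcon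
  have hsub : (PySem.List.pyRange lo (lo + m + 1)).toFinset ⊆ P.toFinset := by
    intro x hx
    rw [List.mem_toFinset] at hx ⊢
    have := hcon x hx
    simpa using this
  have h1 : (PySem.List.pyRange lo (lo + m + 1)).toFinset.card = m + 1 := by
    rw [List.toFinset_card_of_nodup (PySem.List.nodup_pyRange_one _ _),
        PySem.List.length_pyRange_one]
    omega
  have h2 := Finset.card_le_card hsub
  have h3 := List.toFinset_card_le P
  omega

theorem find?_window (P : List Int) (lo n : Int) (m : Nat) (hP : P.length ≤ m) :
    (PySem.List.pyRange lo (n + 1)).find? (fun c => !P.contains c)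
      = (PySem.List.pyRange lo (min n (lo + m) + 1)).find? (fun c => !P.contains c) := by
  rcases lt_or_ge (lo + m) n with hn | hn
  · rw [min_eq_right hn.le]
    rw [PySem.List.pyRange_one_append lo (lo + m + 1) (n + 1) (by omega) (by omega),
        List.find?_append]
    obtain ⟨c, hc, hpc⟩ := pigeon_window P lo m hP
    have hsome : ((PySem.List.pyRange lo (lo + m + 1)).find? (fun c => !P.contains c)).isSome := by
      rw [List.find?_isSome]; exact ⟨c, hc, hpc⟩
    obtain ⟨v, hv⟩ := Option.isSome_iff_exists.1 hsome
    rw [hv]; rfl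
  · rw [min_eq_left hn]

theorem take_set_self (u : List Int) (y : Nat) (a : Int) : (u.set y a).take y = u.take y := by
  rw [List.take_set, List.set_eq_of_length_le (by simp)]

theorem take_set_succ (u : List Int) (y : Nat) (a : Int) (h : y < u.length) :
    (u.set y a).take (y + 1) = u.take y ++ [a] := by
  rw [List.take_add_one, take_set_self, List.getElem?_set_self h]; rfl

theorem getD_set_self (u : List Int) (y : Nat) (a : Int) (h : y < u.length) :
    (u.set y a).getD y 0 = a := by
  simp [List.getD, List.getElem?_set_self h]

theorem aFill_eq (n : Int) : ∀ (k : Nat) (u : List Int) (y : Nat), y + k = u.length →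
    aFill u y u.length n =
      (if ((PySem.List.pyRange 1 (n + 1)).filter (fun c => !((u.take y).contains c))).length < k then []
       else u.take y ++ ((PySem.List.pyRange 1 (n + 1)).filter (fun c => !((u.take y).contains c))).take k) := by
  intro k
  induction k with
  | zero =>
    intro u y hy
    rw [aFill, if_neg (by omega)]
    simp [List.take_of_length_le (by omega : u.length ≤ y)]
  | succ k ih =>
    intro u y hy
    rw [aFill, if_pos (by omega : y < u.length)]
    have hmp : moguPovecatNa u y n true
        = (((PySem.List.pyRange 1 (n + 1)).filter (fun c => !((u.take y).contains c))).head?).getD (-1) := by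
      show mpnLoop ((u.set y 0).take y) ((u.set y 0).getD y 0) n 1 = _
      rw [take_set_self, getD_set_self u y 0 (by omega), mpnLoop_eq, ← find?_eq_head?_filter]
      norm_num
    rcases hav : ((PySem.List.pyRange 1 (n + 1)).filter (fun c => !((u.take y).contains c))) with _ | ⟨a, r⟩
    · rw [hav] at hmp
      simp only [List.head?_nil, Option.getD_none] at hmp
      rw [hmp]; simp
    · rw [hav] at hmp
      simp only [List.head?_cons, Option.getD_some] at hmp
      have ha1 : 1 ≤ a := by
        have hmem : a ∈ (PySem.List.pyRange 1 (n + 1)).filter (fun c => !((u.take y).contains c)) := by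
          rw [hav]; exact List.mem_cons_self
        have := List.mem_of_mem_filter hmem
        exact (PySem.List.mem_pyRange_one.1 this).1
      rw [hmp, if_neg (by omega : ¬ a = -1)]
      have hlen : (u.set y a).length = u.length := by simp
      have hih := ih (u.set y a) (y + 1) (by omega)
      rw [hlen] at hih
      rw [hih]
      have htake : (u.set y a).take (y + 1) = u.take y ++ [a] := take_set_succ u y a (by omega)
      have hfilt : ((PySem.List.pyRange 1 (n + 1)).filter
          (fun c => !(((u.set y a).take (y + 1)).contains c))) = r := by
        rw [htake]
        have hpred : (fun c => !((u.take y ++ [a]).contains c))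
            = (fun c => (!((u.take y).contains c)) && !(c == a)) := by
          funext c
          by_cases hca : c = a <;> by_cases hcm : c ∈ List.take y u <;> simp [hca, hcm]
        rw [hpred]
        exact filter_drop_head (PySem.List.nodup_pyRange_one _ _) hav
      rw [hfilt, htake]
      by_cases hc : r.length < k
      · rw [if_pos hc, if_pos (by simp; omega)]
      · rw [if_neg hc, if_neg (by simp; omega)]
        simp [List.take_succ_cons]

theorem avail_window (P : List Int) (n : Int) (need m : Nat) (hP : P.length ≤ m + 1) :
    ((((PySem.List.pyRange 1 (n + 1)).filter (fun c => !P.contains c)).length < need ↔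
      (((PySem.List.pyRange 1 (min n ((need : Int) + (m : Int) + 1) + 1)).filter (fun c => !P.contains c)).length < need)) ∧
     (¬ ((PySem.List.pyRange 1 (n + 1)).filter (fun c => !P.contains c)).length < need →
      ((PySem.List.pyRange 1 (n + 1)).filter (fun c => !P.contains c)).take need
        = ((PySem.List.pyRange 1 (min n ((need : Int) + (m : Int) + 1) + 1)).filter (fun c => !P.contains c)).take need)) := by
  rcases lt_or_ge ((need : Int) + (m : Int) + 1) n with hn | hn
  · rw [min_eq_right hn.le]
    have hsplit : PySem.List.pyRange 1 (n + 1)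
        = PySem.List.pyRange 1 ((need : Int) + (m : Int) + 1 + 1) ++ PySem.List.pyRange ((need : Int) + (m : Int) + 1 + 1) (n + 1) :=
      PySem.List.pyRange_one_append _ _ _ (by omega) (by omega)
    rw [hsplit, List.filter_append]
    have hKlen : ((PySem.List.pyRange 1 ((need : Int) + (m : Int) + 1 + 1)).filter (fun c => !P.contains c)).length ≥ need := by
      have h1 := length_le_filter_add (l := PySem.List.pyRange 1 ((need : Int) + (m : Int) + 1 + 1)) (P := P)
        (PySem.List.nodup_pyRange_one _ _)
      rw [PySem.List.length_pyRange_one] at h1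
      omega
    constructor
    · rw [List.length_append]; omega
    · intro _
      rw [List.take_append_of_le_length hKlen]
  · rw [min_eq_left hn]
    exact ⟨Iff.rfl, fun _ => rfl⟩

theorem pred_ofList (xs : List Int) :
    (fun c => !(PySem.Set.contains (PySem.Set.ofList xs) c)) = (fun c => !xs.contains c) := by
  funext c
  by_cases h : c ∈ xs <;> simp [PySem.Set.mem_ofList, h]

theorem pred_ofList_ne (xs : List Int) (v : Int) :
    (fun c => !(PySem.Set.contains (PySem.Set.ofList xs) c) && !(c == v))
      = (fun c => !((xs ++ [v]).contains c)) := by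
  funext c
  by_cases h : c ∈ xs <;> by_cases hv : c = v <;> simp [PySem.Set.mem_ofList, h, hv]

theorem bLoop_succ (p : List Int) (n : Int) (pp : Nat) :
    bLoop p n (pp + 1)
      = (if (((PySem.List.pyRange (p.getD pp 0 + 1) (min n (p.getD pp 0 + (pp : Int) + 1) + 1)).find?
            (fun c => !(PySem.Set.contains (PySem.Set.ofList (p.take pp)) c))).getD (-1) == -1)
         then bLoop p n pp
         else
           let v := ((PySem.List.pyRange (p.getD pp 0 + 1) (min n (p.getD pp 0 + (pp : Int) + 1) + 1)).find?
            (fun c => !(PySem.Set.contains (PySem.Set.ofList (p.take pp)) c))).getD (-1)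
           if (((PySem.List.pyRange 1 (min n (((p.length - 1 - pp : Nat) : Int) + (pp : Int) + 1) + 1)).filter
                 (fun c => !(PySem.Set.contains (PySem.Set.ofList (p.take pp)) c) && !(c == v))).length
                < p.length - 1 - pp) then []
           else p.take pp ++ [v] ++ ((PySem.List.pyRange 1 (min n (((p.length - 1 - pp : Nat) : Int) + (pp : Int) + 1) + 1)).filter
                 (fun c => !(PySem.Set.contains (PySem.Set.ofList (p.take pp)) c) && !(c == v))).take (p.length - 1 - pp)) := rfl

theorem bwin_eq_ffA (p : List Int) (n : Int) (pp : Nat) (h : pp < p.length) :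
    (PySem.List.pyRange (p.getD pp 0 + 1) (min n (p.getD pp 0 + (pp : Int) + 1) + 1)).find?
      (fun c => !(PySem.Set.contains (PySem.Set.ofList (p.take pp)) c)) = ffA p n pp := by
  rw [pred_ofList]
  have harith : p.getD pp 0 + (pp : Int) + 1 = (p.getD pp 0 + 1) + (pp : Int) := by ring
  rw [harith]
  exact (find?_window (p.take pp) (p.getD pp 0 + 1) n pp (by simp [Nat.le_of_lt h])).symm

theorem loops_eq (p : List Int) (n : Int) :
    ∀ (r x : Nat), x + r = p.length → aLoop p p n x = bLoop p n r := by
  intro r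
  induction r with
  | zero =>
    intro x hx
    rw [aLoop, if_neg (by omega)]
    rfl
  | succ pp ih =>
    intro x hx
    have hxlen : x < p.length := by omega
    have hpplen : pp < p.length := by omega
    rw [aLoop, if_pos hxlen, bLoop_succ, bwin_eq_ffA p n pp hpplen]
    have hpos : p.length - 1 - x = pp := by omega
    rw [hpos]
    have hbroj : moguPovecatNa p pp n false = (ffA p n pp).getD (-1) := by
      show mpnLoop (p.take pp) (p.getD pp 0) n 1 = _
      rw [mpnLoop_eq]; rfl
    rw [hbroj]
    by_cases hv1 : (ffA p n pp).getD (-1) = -1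
    · -- A skips (broj = -1); B also continues (v == -1, found or defaulted)
      rw [hv1]
      simp only [ne_eq, not_true_eq_false, if_false, beq_self_eq_true, if_true]
      exact ih (x + 1) (by omega)
    · -- both succeed at index pp with the same value v
      rw [if_pos hv1, if_neg (by simpa using hv1)]
      set v := (ffA p n pp).getD (-1) with hvdef
      show _ = if _ then _ else _
      have hneed : p.length - 1 - pp = x := by omega
      have hl2 : p.length - x = pp + 1 := by omega
      rw [hl2]
      have hfill := aFill_eq n x (p.set pp v) (pp + 1) (by simp; omega)
      simp only [List.length_set] at hfill
      rw [hfill]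
      have htake : (p.set pp v).take (pp + 1) = p.take pp ++ [v] := take_set_succ p pp v hpplen
      rw [htake, hneed]
      have hpredB := pred_ofList_ne (p.take pp) v
      rw [hpredB]
      have havw := avail_window (p.take pp ++ [v]) n x pp (by simp)
      rcases havw with ⟨hiff, htakeq⟩
      by_cases hcond : ((PySem.List.pyRange 1 (n + 1)).filter (fun c => !((p.take pp ++ [v]).contains c))).length < x
      · rw [if_pos hcond, if_pos (hiff.1 hcond)]
      · rw [if_neg hcond, if_neg (fun hcontra => hcond (hiff.2 hcontra))]
        rw [htakeq hcond, List.append_assoc]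

-- ===== VERDICT (by name: the statement is the Claim_ definition above) =====
theorem dohvatiSljInjek_spec : Claim_equal_dohvatiSljInjek := by
  intro p n _
  show aLoop p p n 0 = bLoop p n p.length
  exact loops_eq p n p.length 0 (by omega)
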